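-- pv_equiv track=rewrite | github.com/LinkNatureAi/python-https | html-response-filter.py | extract_p_tags
-- ===== SOURCE A (Python) =====
-- def extract_p_tags(data):
--     # Find all occurrences of <p>...</p> in the data
--     p_tags = []
--     start = 0
--     while True:
--         start = data.find("<p>", start)
--         if start == -1:
--             break
--         end = data.find("</p>", start)
--         if end == -1:
--             break
--         p_tags.append(data[start:end+4])
--         start = end + 4
--     return p_tags
-- ===== SOURCE B (Python) =====
-- def extract_p_tags(data):
--     # One-pass character scan with an explicit inside/outside state machine:
--     # no repeated str.find calls, each character is examined once.
--     p_tags = []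
--     buf = None  # None = outside a <p> tag; else chars collected since "<p>"
--     i = 0
--     n = len(data)
--     while i < n:
--         if buf is None:
--             if data.startswith("<p>", i):
--                 buf = "<p>"
--                 i += 3
--             else:
--                 i += 1
--         else:
--             if data.startswith("</p>", i):
--                 p_tags.append(buf + "</p>")
--                 buf = None
--                 i += 4
--             else:
--                 buf += data[i]
--                 i += 1
--     return p_tags
-- ===== Notes on version B (the rewrite author's own statement) =====
-- stated objective: alternative
-- what changed: Replaced the repeated data.find scans and slicing of the while-loop by a single left-to-right character pass with an explicit inside/outside state machine that accumulates the current tag in a buffer.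
import Mathlib
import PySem

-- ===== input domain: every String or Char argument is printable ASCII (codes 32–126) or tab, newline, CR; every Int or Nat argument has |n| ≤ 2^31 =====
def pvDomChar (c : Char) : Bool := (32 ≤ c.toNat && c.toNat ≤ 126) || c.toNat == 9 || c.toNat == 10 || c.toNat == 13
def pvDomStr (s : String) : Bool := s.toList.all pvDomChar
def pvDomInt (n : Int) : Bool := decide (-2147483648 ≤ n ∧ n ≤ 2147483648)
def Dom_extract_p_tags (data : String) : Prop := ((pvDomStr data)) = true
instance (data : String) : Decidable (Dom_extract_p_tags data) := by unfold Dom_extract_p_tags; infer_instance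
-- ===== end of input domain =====

-- B replaces A's repeated str.find scans by a single left-to-right character pass
-- with an explicit inside/outside state machine (objective: alternative algorithm).

-- ===== PORT A =====
-- A's while-loop: start = data.find("<p>", start); end = data.find("</p>", start);
-- append data[start:end+4]; start = end + 4.  findFrom past the end of the list is -1
-- (this fact is used only to prove the loop terminates).
theorem pvFindFrom_past (s sub : List Char) (k : Nat) (h : s.length < k) :
    PySem.Chars.findFrom s sub (k : Int) none = -1 := by
  simp only [PySem.Chars.findFrom]
  rw [if_pos (by omega)]

def pvLoopA (data : List Char) (start : Nat) : List String :=
  let st := PySem.Chars.findFrom data ['<', 'p', '>'] (start : Int) none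
  if h1 : st = -1 then []
  else
    let en := PySem.Chars.findFrom data ['<', '/', 'p', '>'] st none
    if h2 : en = -1 then []
    else
      String.ofList (PySem.Chars.slice data (some st) (some (en + 4)))
        :: pvLoopA data (en + 4).toNat
termination_by data.length + 1 - start
decreasing_by
  change data.length + 1 - (en + 4).toNat < data.length + 1 - start
  by_cases hk : start ≤ data.length
  · obtain ⟨hst1, hst2, -⟩ :=
      PySem.Chars.findFrom_natCast_spec data ['<', 'p', '>'] start hk h1
    have hst0 : (0 : Int) ≤ st := le_trans (by exact_mod_cast Nat.zero_le start) hst1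
    have hstc : st = ((st.toNat : Nat) : Int) := by omega
    have hstlen : st.toNat ≤ data.length := by
      have h := hst2.length_le
      simp only [List.length_drop, List.length_cons, List.length_nil] at h
      omega
    have h2' : PySem.Chars.findFrom data ['<', '/', 'p', '>'] ((st.toNat : Nat) : Int) none ≠ -1 := by
      rw [← hstc]; exact h2
    obtain ⟨hen1, hen2, -⟩ :=
      PySem.Chars.findFrom_natCast_spec data ['<', '/', 'p', '>'] st.toNat hstlen h2'
    have henEq : en = PySem.Chars.findFrom data ['<', '/', 'p', '>'] ((st.toNat : Nat) : Int) none :=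
      congrArg (fun x => PySem.Chars.findFrom data ['<', '/', 'p', '>'] x none) hstc
    have henlen : (PySem.Chars.findFrom data ['<', '/', 'p', '>'] ((st.toNat : Nat) : Int) none).toNat + 4 ≤ data.length := by
      have h := hen2.length_le
      simp only [List.length_drop, List.length_cons, List.length_nil] at h
      omega
    omega
  · exact absurd (pvFindFrom_past data _ start (by omega)) h1

def extract_p_tags (data : String) : List String := pvLoopA data.toList 0

-- ===== PORT B =====
-- Source B's single pass: buf = none means "outside a tag"; some b carries the chars
-- collected since the last "<p>"; data.startswith(tag, i) is the isPrefixOf test.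
def pvScanB (buf : Option (List Char)) (s : List Char) : List String :=
  match s with
  | [] => []
  | c :: rest =>
    match buf with
    | none =>
      if ['<', 'p', '>'].isPrefixOf (c :: rest) then
        pvScanB (some ['<', 'p', '>']) ((c :: rest).drop 3)
      else pvScanB none rest
    | some b =>
      if ['<', '/', 'p', '>'].isPrefixOf (c :: rest) then
        String.ofList (b ++ ['<', '/', 'p', '>']) :: pvScanB none ((c :: rest).drop 4)
      else pvScanB (some (b ++ [c])) rest
termination_by s.length
decreasing_by all_goals (simp only [List.length_drop, List.length_cons]; omega)

def extract_p_tags_alt (data : String) : List String := pvScanB none data.toList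

-- ===== PRECONDITION & SPEC =====
def Spec_extract_p_tags (data : String) (out : List String) : Prop := out = extract_p_tags_alt data
instance (data : String) (out : List String) : Decidable (Spec_extract_p_tags data out) := by unfold Spec_extract_p_tags; infer_instance

-- ===== CLAIM (what is proved, stated in full; the proofs are below) =====
def Claim_equal_extract_p_tags : Prop := ∀ (data : String), Dom_extract_p_tags data → Spec_extract_p_tags data (extract_p_tags data)

-- ===== LEMMAS AND PROOFS =====

-- outside state, no "<p>" anywhere: nothing is produced
theorem pvScanB_none_out {t : List Char} (h : ¬ ['<', 'p', '>'] <:+: t) :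
    pvScanB none t = [] := by
  induction t with
  | nil => rw [pvScanB]
  | cons c rest ih =>
    rw [pvScanB]
    rw [if_neg (fun hp => h (List.isPrefixOf_iff_prefix.mp hp).isInfix)]
    exact ih (fun hi => h (hi.trans (List.drop_suffix 1 (c :: rest)).isInfix))

-- inside state, no "</p>" anywhere: the open tag is dropped
theorem pvScanB_none_in {u : List Char} (b : List Char) (h : ¬ ['<', '/', 'p', '>'] <:+: u) :
    pvScanB (some b) u = [] := by
  induction u generalizing b with
  | nil => rw [pvScanB]
  | cons c rest ih =>
    rw [pvScanB]
    rw [if_neg (fun hp => h (List.isPrefixOf_iff_prefix.mp hp).isInfix)]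
    exact ih _ (fun hi => h (hi.trans (List.drop_suffix 1 (c :: rest)).isInfix))

-- outside state, first "<p>" at position j: the machine reaches it and switches state
theorem pvScanB_skip_out {j : Nat} : ∀ {t : List Char},
    (∀ i < j, ¬ ['<', 'p', '>'] <+: t.drop i) → ['<', 'p', '>'] <+: t.drop j →
    pvScanB none t = pvScanB (some ['<', 'p', '>']) (t.drop (j + 3)) := by
  induction j with
  | zero =>
    intro t _ hj
    simp only [List.drop_zero] at hj
    obtain ⟨w, hw⟩ := hj
    subst hw
    simp only [List.cons_append, List.nil_append]
    rw [pvScanB]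
    rw [if_pos (List.isPrefixOf_iff_prefix.mpr (by simp [List.cons_prefix_cons]))]
  | succ j ih =>
    intro t hlt hj
    match t with
    | [] => exact absurd hj.length_le (by simp)
    | c :: rest =>
      rw [pvScanB]
      rw [if_neg (fun hp => hlt 0 (by omega) (by simpa using List.isPrefixOf_iff_prefix.mp hp))]
      have h := ih (t := rest)
        (fun i hi => by simpa using hlt (i + 1) (by omega))
        (by simpa using hj)
      simpa using h

-- inside state, first "</p>" at position m: the machine emits buf ++ u.take m ++ "</p>"
theorem pvScanB_skip_in {m : Nat} : ∀ {u b : List Char},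
    (∀ i < m, ¬ ['<', '/', 'p', '>'] <+: u.drop i) → ['<', '/', 'p', '>'] <+: u.drop m →
    pvScanB (some b) u =
      String.ofList (b ++ u.take m ++ ['<', '/', 'p', '>']) :: pvScanB none (u.drop (m + 4)) := by
  induction m with
  | zero =>
    intro u b _ hm
    simp only [List.drop_zero] at hm
    obtain ⟨w, hw⟩ := hm
    subst hw
    simp only [List.cons_append, List.nil_append]
    rw [pvScanB]
    rw [if_pos (List.isPrefixOf_iff_prefix.mpr (by simp [List.cons_prefix_cons]))]
    simp
  | succ m ih =>
    intro u b hlt hm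
    match u with
    | [] => exact absurd hm.length_le (by simp)
    | c :: rest =>
      rw [pvScanB]
      rw [if_neg (fun hp => hlt 0 (by omega) (by simpa using List.isPrefixOf_iff_prefix.mp hp))]
      have h := ih (u := rest) (b := b ++ [c])
        (fun i hi => by simpa using hlt (i + 1) (by omega))
        (by simpa using hm)
      rw [h]
      simp

-- the main loop invariant: A's index loop equals B's machine on the remaining suffix
theorem pvLoopA_eq_scanB (data : List Char) :
    ∀ fuel start, data.length - start < fuel → start ≤ data.length →
    pvLoopA data start = pvScanB none (data.drop start) := by
  intro fuel
  induction fuel with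
  | zero => intro start h _; omega
  | succ fuel ih =>
    intro start hfuel hk
    rw [pvLoopA]
    simp only
    by_cases h1 : PySem.Chars.findFrom data ['<', 'p', '>'] (start : Int) none = -1
    · rw [dif_pos h1]
      rw [PySem.Chars.findFrom_natCast _ _ start hk] at h1
      have hno : ¬ ['<', 'p', '>'] <:+: data.drop start := by
        by_cases hf : PySem.Chars.find (data.drop start) ['<', 'p', '>'] = -1
        · exact (PySem.Chars.find_eq_neg_one_iff _ _).mp hf
        · rw [if_neg hf] at h1
          have := PySem.Chars.neg_one_le_find (data.drop start) ['<', 'p', '>']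
          omega
      rw [pvScanB_none_out hno]
    · rw [dif_neg h1]
      obtain ⟨hst1, hst2, hst3⟩ :=
        PySem.Chars.findFrom_natCast_spec data ['<', 'p', '>'] start hk h1
      set st := PySem.Chars.findFrom data ['<', 'p', '>'] (start : Int) none with hstdef
      have hst0 : (0 : Int) ≤ st := le_trans (by exact_mod_cast Nat.zero_le start) hst1
      set j : Nat := st.toNat - start with hjdef
      have hstj : st.toNat = start + j := by omega
      rw [hstj] at hst2 hst3
      have hstc : st = (((start + j : Nat)) : Int) := by omega
      have hstlen : start + j + 3 ≤ data.length := by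
        have h := hst2.length_le
        simp only [List.length_drop, List.length_cons, List.length_nil] at h
        omega
      -- decompose the suffix at the opening tag
      obtain ⟨rest, hrest⟩ := hst2
      have hrest3 : data.drop (start + j + 3) = rest := by
        have h : data.drop (start + j + 3) = (data.drop (start + j)).drop 3 := by
          rw [List.drop_drop]
        rw [h, ← hrest]
        rfl
      -- B reaches the opening tag
      have hB1 : pvScanB none (data.drop start) =
          pvScanB (some ['<', 'p', '>']) (data.drop (start + j + 3)) := by
        have h := pvScanB_skip_out (j := j) (t := data.drop start)
          (fun i hi => by
            rw [List.drop_drop]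
            exact hst3 (start + i) (by omega) (by omega))
          (by rw [List.drop_drop, ← hrest]; exact List.prefix_append _ _)
        rw [h, List.drop_drop, show start + (j + 3) = start + j + 3 from by omega]
      by_cases h2 : PySem.Chars.findFrom data ['<', '/', 'p', '>'] st none = -1
      · rw [dif_pos h2]
        rw [hstc, PySem.Chars.findFrom_natCast _ _ (start + j) (by omega)] at h2
        have hno4 : ¬ ['<', '/', 'p', '>'] <:+: data.drop (start + j) := by
          by_cases hf : PySem.Chars.find (data.drop (start + j)) ['<', '/', 'p', '>'] = -1
          · exact (PySem.Chars.find_eq_neg_one_iff _ _).mp hf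
          · rw [if_neg hf] at h2
            have := PySem.Chars.neg_one_le_find (data.drop (start + j)) ['<', '/', 'p', '>']
            omega
        rw [hB1, pvScanB_none_in (u := data.drop (start + j + 3)) ['<', 'p', '>'] (fun hi => hno4 (by
          have h3 : data.drop (start + j + 3) = (data.drop (start + j)).drop 3 := by
            rw [List.drop_drop]
          rw [h3] at hi
          exact hi.trans (List.drop_suffix 3 _).isInfix))]
      · rw [dif_neg h2]
        have h2' : PySem.Chars.findFrom data ['<', '/', 'p', '>'] (((start + j : Nat)) : Int) none ≠ -1 := by
          rw [← hstc]; exact h2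
        obtain ⟨hen1, hen2, hen3⟩ :=
          PySem.Chars.findFrom_natCast_spec data ['<', '/', 'p', '>'] (start + j) (by omega) h2'
        set e2 := PySem.Chars.findFrom data ['<', '/', 'p', '>'] (((start + j : Nat)) : Int) none with he2def
        have henEq : PySem.Chars.findFrom data ['<', '/', 'p', '>'] st none = e2 := by
          rw [hstc]
        have he20 : (0 : Int) ≤ e2 := le_trans (by exact_mod_cast Nat.zero_le (start + j)) hen1
        have he2len : e2.toNat + 4 ≤ data.length := by
          have h := hen2.length_le
          simp only [List.length_drop, List.length_cons, List.length_nil] at h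
          omega
        -- the closing tag cannot start inside the opening "<p>": e2 ≥ start + j + 3
        have he2lo : start + j + 3 ≤ e2.toNat := by
          by_contra hcon
          have hd : e2.toNat = start + j ∨ e2.toNat = start + j + 1 ∨ e2.toNat = start + j + 2 := by
            omega
        -- in each case the head characters of the suffix contradict "</p>" being a prefix
          rcases hd with hd | hd | hd
          · rw [show e2.toNat = start + j from hd, ← hrest] at hen2
            simp only [List.cons_append, List.nil_append, List.cons_prefix_cons] at hen2
            exact absurd hen2.2.1 (by decide)
          · rw [show e2.toNat = start + j + 1 from hd] at hen2
            have hd1 : data.drop (start + j + 1) = 'p' :: '>' :: rest := by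
              have h : data.drop (start + j + 1) = (data.drop (start + j)).drop 1 := by
                rw [List.drop_drop]
              rw [h, ← hrest]
              rfl
            rw [hd1] at hen2
            simp only [List.cons_prefix_cons] at hen2
            exact absurd hen2.1 (by decide)
          · rw [show e2.toNat = start + j + 2 from hd] at hen2
            have hd2 : data.drop (start + j + 2) = '>' :: rest := by
              have h : data.drop (start + j + 2) = (data.drop (start + j)).drop 2 := by
                rw [List.drop_drop]
              rw [h, ← hrest]
              rfl
            rw [hd2] at hen2
            simp only [List.cons_prefix_cons] at hen2
            exact absurd hen2.1 (by decide)
        set m : Nat := e2.toNat - (start + j + 3) with hmdef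
        have hm4 : e2.toNat = start + j + 3 + m := by omega
        -- B collects m characters and emits the closed tag
        have hB2 : pvScanB (some ['<', 'p', '>']) rest =
            String.ofList (['<', 'p', '>'] ++ rest.take m ++ ['<', '/', 'p', '>'])
              :: pvScanB none (rest.drop (m + 4)) := by
          refine pvScanB_skip_in
            (fun i hi => by
              rw [← hrest3, List.drop_drop]
              exact hen3 (start + j + 3 + i) (by omega) (by omega))
            (by rw [← hrest3, List.drop_drop, ← hm4]; exact hen2)
        rw [hB1, hrest3, hB2, henEq]
        -- A's slice equals B's emitted string
        have he2c : e2 = ((e2.toNat : Nat) : Int) := by omega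
        have hslice : PySem.Chars.slice data (some st) (some (e2 + 4)) =
            ['<', 'p', '>'] ++ rest.take m ++ ['<', '/', 'p', '>'] := by
          rw [hstc, he2c,
              show (((e2.toNat : Nat) : Int) + 4) = (((e2.toNat + 4 : Nat)) : Int) from by omega]
          show PySem.List.slice data (some ((start + j : Nat) : Int)) (some ((e2.toNat + 4 : Nat) : Int)) = _
          rw [PySem.List.slice_natCast, ← hrest,
              show e2.toNat + 4 - (start + j) = 3 + (m + 4) from by omega,
              List.take_add,
              List.take_left' (show (['<', 'p', '>'] : List Char).length = 3 from rfl),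
              List.drop_left' (show (['<', 'p', '>'] : List Char).length = 3 from rfl),
              List.take_add]
          have h4 : ['<', '/', 'p', '>'] <+: rest.drop m := by
            rw [← hrest3, List.drop_drop, ← hm4]
            exact hen2
          obtain ⟨w, hw⟩ := h4
          rw [← hw, List.take_left' (show (['<', '/', 'p', '>'] : List Char).length = 4 from rfl)]
          simp
        rw [hslice]
        -- the tails agree by the induction hypothesis
        have htail : pvLoopA data (e2 + 4).toNat = pvScanB none (rest.drop (m + 4)) := by
          have hnat : (e2 + 4).toNat = e2.toNat + 4 := by omega
          rw [hnat, ih (e2.toNat + 4) (by omega) (by omega), ← hrest3, List.drop_drop,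
              show start + j + 3 + (m + 4) = e2.toNat + 4 from by omega]
        rw [htail]

-- ===== VERDICT (by name: the statement is the Claim_ definition above) =====
theorem extract_p_tags_spec : Claim_equal_extract_p_tags := by
  intro data _
  unfold Spec_extract_p_tags extract_p_tags extract_p_tags_alt
  rw [pvLoopA_eq_scanB data.toList (data.toList.length + 1) 0 (by omega) (by omega)]
  simp
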